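-- pv_equiv track=rewrite | github.com/Bejjoeqq/Basic-Python | pdp9/tanggal.py | HariKe
-- ===== SOURCE A (Python) =====
-- def IsKabisat(Y):
-- 	if Y % 100 == 0:
-- 		return Y % 400 == 0
-- 	return Y % 4 == 0
--
-- def HariKe(T):
-- 	b=1
-- 	total=0
-- 	while True:
-- 		if b==1 or b==3 or b==5 or b==7 or b==8 or b==10 or b==12:
-- 			total+=31
-- 		elif b==4 or b==6 or b==9 or b==11:
-- 			total+=30
-- 		elif b==2:
-- 			if IsKabisat(T["tahun"])==False:
-- 				total+=28
-- 			else: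
-- 				total+=29
-- 		else:
-- 			return False
-- 		if b==T["bulan"]:
-- 			return total
-- 		b+=1
-- ===== SOURCE B (Python) =====
-- def IsKabisat(Y):
-- 	if Y % 100 == 0:
-- 		return Y % 400 == 0
-- 	return Y % 4 == 0
--
-- # cumulative day counts at the end of each month (non-leap year)
-- _CUM = [0, 31, 59, 90, 120, 151, 181, 212, 243, 273, 304, 334, 365]
--
-- def HariKe(T):
-- 	bulan = T["bulan"]
-- 	if not (1 <= bulan <= 12):
-- 		return False
-- 	total = _CUM[bulan]
-- 	if bulan >= 2 and IsKabisat(T["tahun"]):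
-- 		total += 1
-- 	return total
-- ===== Notes on version B (the rewrite author's own statement) =====
-- stated objective: simpler
-- what changed: Replaces A's accumulating while-loop over months with a single lookup in a cumulative month-day prefix table plus a leap-day adjustment for months >= 2.
-- outside the precondition, e.g. on HariKe({'bulan': 13, 'tahun': 2000}): A returns False, B returns False
import Mathlib
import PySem

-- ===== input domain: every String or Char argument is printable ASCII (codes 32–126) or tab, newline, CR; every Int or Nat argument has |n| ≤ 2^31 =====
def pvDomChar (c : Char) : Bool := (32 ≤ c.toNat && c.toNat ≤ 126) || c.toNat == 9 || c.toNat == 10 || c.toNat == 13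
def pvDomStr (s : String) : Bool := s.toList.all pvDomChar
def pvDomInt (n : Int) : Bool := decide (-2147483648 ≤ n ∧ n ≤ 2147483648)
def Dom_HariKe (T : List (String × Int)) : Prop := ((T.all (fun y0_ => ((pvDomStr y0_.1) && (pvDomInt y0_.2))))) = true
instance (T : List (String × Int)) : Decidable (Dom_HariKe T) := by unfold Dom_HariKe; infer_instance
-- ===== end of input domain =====

-- B replaces A's accumulating while-loop by a cumulative month-day prefix table plus a leap-day adjustment (simpler).


-- ===== PORT A =====
def IsKabisat (Y : Int) : Bool :=
  if PySem.Int.mod Y 100 = 0 then decide (PySem.Int.mod Y 400 = 0)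
  else decide (PySem.Int.mod Y 4 = 0)

-- the 'while True' loop of A; fuel 13 suffices since b starts at 1 and the else-branch fires at b = 13.
-- 'return False' (bulan not a valid month, a non-int value) is outside Pre_; the port yields 0 there.
def HariKeGo (T : List (String × Int)) (b total : Int) : Nat → Int
  | 0 => 0
  | fuel + 1 =>
    let step : Option Int :=
      if b = 1 ∨ b = 3 ∨ b = 5 ∨ b = 7 ∨ b = 8 ∨ b = 10 ∨ b = 12 then some (total + 31)
      else if b = 4 ∨ b = 6 ∨ b = 9 ∨ b = 11 then some (total + 30)
      else if b = 2 then
        if IsKabisat ((PySem.Dict.mk T).getD "tahun" 0) = false then some (total + 28)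
        else some (total + 29)
      else none
    match step with
    | none => 0
    | some t =>
      if b = (PySem.Dict.mk T).getD "bulan" 0 then t
      else HariKeGo T (b + 1) t fuel

def HariKe (T : List (String × Int)) : Int := HariKeGo T 1 0 13

-- ===== PORT B =====
def cumDays : List Int := [0, 31, 59, 90, 120, 151, 181, 212, 243, 273, 304, 334, 365]

-- 'return False' (invalid month, outside Pre_) is ported as 0.
def HariKe_alt (T : List (String × Int)) : Int :=
  let bulan := (PySem.Dict.mk T).getD "bulan" 0
  if 1 ≤ bulan ∧ bulan ≤ 12 then
    let total := (PySem.List.pyGet? cumDays bulan).getD 0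
    if 2 ≤ bulan ∧ IsKabisat ((PySem.Dict.mk T).getD "tahun" 0) then total + 1
    else total
  else 0

-- ===== PRECONDITION & SPEC =====
-- Pre_ excludes inputs where Python A does not return an int: a "bulan" value outside 1..12 (A returns
-- False, a bool, there) and a missing "bulan", or a missing "tahun" with "bulan" ≥ 2 (A raises KeyError).
def Pre_HariKe (T : List (String × Int)) : Prop :=
  1 ≤ (PySem.Dict.mk T).getD "bulan" 0 ∧ (PySem.Dict.mk T).getD "bulan" 0 ≤ 12 ∧
  ((PySem.Dict.mk T).getD "bulan" 0 = 1 ∨ ((PySem.Dict.mk T).get? "tahun").isSome = true)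
instance (T : List (String × Int)) : Decidable (Pre_HariKe T) := by unfold Pre_HariKe; infer_instance
def pvWitness_HariKe : (List (String × Int)) := [("bulan", 3), ("tahun", 2000)]

def Spec_HariKe (T : List (String × Int)) (out : Int) : Prop := out = HariKe_alt T
instance (T : List (String × Int)) (out : Int) : Decidable (Spec_HariKe T out) := by unfold Spec_HariKe; infer_instance

-- ===== CLAIM (what is proved, stated in full; the proofs are below) =====
def Claim_equal_HariKe : Prop := ∀ (T : List (String × Int)), Dom_HariKe T → Pre_HariKe T → Spec_HariKe T (HariKe T)

-- ===== LEMMAS AND PROOFS =====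
-- pure copy of A's loop, depending only on the two looked-up values (proof device)
def HariKeGoP (m : Int) (leap : Bool) (b total : Int) : Nat → Int
  | 0 => 0
  | fuel + 1 =>
    let step : Option Int :=
      if b = 1 ∨ b = 3 ∨ b = 5 ∨ b = 7 ∨ b = 8 ∨ b = 10 ∨ b = 12 then some (total + 31)
      else if b = 4 ∨ b = 6 ∨ b = 9 ∨ b = 11 then some (total + 30)
      else if b = 2 then
        if leap = false then some (total + 28) else some (total + 29)
      else none
    match step with
    | none => 0
    | some t => if b = m then t else HariKeGoP m leap (b + 1) t fuel

theorem go_pure (T : List (String × Int)) (b total : Int) (f : Nat) :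
    HariKeGo T b total f
      = HariKeGoP ((PySem.Dict.mk T).getD "bulan" 0)
          (IsKabisat ((PySem.Dict.mk T).getD "tahun" 0)) b total f := by
  induction f generalizing b total with
  | zero => rfl
  | succ f ih => simp only [HariKeGo, HariKeGoP, ih]

-- ===== VERDICT (by name: the statement is the Claim_ definition above) =====
theorem HariKe_spec : Claim_equal_HariKe := by
  intro T _ hpre
  obtain ⟨h1, h2, _⟩ := hpre
  unfold Spec_HariKe HariKe HariKe_alt
  rw [go_pure]
  cases hk : IsKabisat ((PySem.Dict.mk T).getD "tahun" 0) <;>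
    generalize hm : (PySem.Dict.mk T).getD "bulan" 0 = m at h1 h2 ⊢ <;>
    interval_cases m <;> decide
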